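-- pv_equiv track=rewrite | github.com/SimeonChifligarov/Alpha_Judge_Softuni | Python_Advanced/Python_Advanced/04_02_Multidimensional_Lists_Exercise_1/04_Maximal_Sum_v5.py | find_max_3x3_square
-- ===== SOURCE A (Python) =====
-- def find_max_3x3_square(matrix_data: list[list[int]]) -> tuple[int, list[list[int]]]:
--     """
--     This function finds the 3x3 square in the matrix with the highest sum.
--
--     Args:
--     matrix_data: a list of lists with all the matrix numbers
--
--     Returns:
--     The highest sum and the corresponding 3x3 submatrix
--     """
--     row_count = len(matrix_data)
--     column_count = len(matrix_data[0])
--     max_sum = float('-inf')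
--     best_submatrix = []
--
--     max_sum, best_submatrix = max(
--         (
--             (sum(matrix_data[r + i][c + j] for i in range(3) for j in range(3)),
--              [[matrix_data[r + i][c + j] for j in range(3)] for i in range(3)])
--             for r in range(row_count - 2) for c in range(column_count - 2)
--         ),
--         key=lambda x: x[0]
--     )
--     return max_sum, best_submatrix
-- ===== SOURCE B (Python) =====
-- def find_max_3x3_square(matrix_data: list[list[int]]) -> tuple[int, list[list[int]]]:
--     """2D prefix-sum re-implementation: each window sum costs O(1) instead of 9 adds."""
--     row_count = len(matrix_data)
--     column_count = len(matrix_data[0])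
--     # pre[i][j] = sum of the top-left i x j corner of the matrix
--     prev = [0] * (column_count + 1)
--     pre = [prev]
--     for row in matrix_data:
--         rp = [0]
--         acc = 0
--         for v in row[:column_count]:
--             acc += v
--             rp.append(acc)
--         prev = [a + b for a, b in zip(prev, rp)]
--         pre.append(prev)
--     best_sum = None
--     best = []
--     for r in range(row_count - 2):
--         for c in range(column_count - 2):
--             s = pre[r + 3][c + 3] - pre[r][c + 3] - pre[r + 3][c] + pre[r][c]
--             if best_sum is None or s > best_sum:
--                 best_sum = s
--                 best = [row[c:c + 3] for row in matrix_data[r:r + 3]]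
--     return best_sum, best
-- ===== Notes on version B (the rewrite author's own statement) =====
-- stated objective: faster
-- what changed: B builds a 2D prefix-sum table once and gets each 3x3 window sum by O(1) inclusion-exclusion with a streaming strict-'>' argmax, instead of A's materialising every candidate (re-summing nine elements and building the submatrix for every window) and taking max(..., key=...).
import Mathlib
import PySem

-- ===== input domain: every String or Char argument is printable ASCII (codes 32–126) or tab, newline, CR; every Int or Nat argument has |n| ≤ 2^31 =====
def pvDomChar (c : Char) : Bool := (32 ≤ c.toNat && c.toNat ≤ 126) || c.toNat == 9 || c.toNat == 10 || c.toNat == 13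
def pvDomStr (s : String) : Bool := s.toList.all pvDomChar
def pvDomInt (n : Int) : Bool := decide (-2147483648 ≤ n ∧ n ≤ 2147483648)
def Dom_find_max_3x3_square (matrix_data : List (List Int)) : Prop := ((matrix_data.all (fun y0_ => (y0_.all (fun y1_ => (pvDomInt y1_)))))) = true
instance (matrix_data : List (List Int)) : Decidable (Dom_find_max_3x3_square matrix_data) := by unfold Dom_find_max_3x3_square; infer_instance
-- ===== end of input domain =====

-- B replaces A's nine-element sum per window by an inclusion-exclusion lookup in a 2D
-- prefix-sum table and a streaming strict-'>' argmax (first maximal window wins, like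
-- Python's max); the returned pair is identical wherever A returns.

-- ===== PORT A =====
-- (Python's initial 'max_sum = float('-inf'); best_submatrix = []' are dead assignments,
--  immediately overwritten by the max(...) call; they do not affect the returned value.)
def find_max_3x3_square (matrix_data : List (List Int)) : Int × List (List Int) :=
  let row_count : Int := matrix_data.length
  -- matrix_data[0]: IndexError on the empty matrix, excluded by Pre_
  let column_count : Int := (PySem.List.pyGetD matrix_data 0 []).length
  let candidates : List (Int × List (List Int)) :=
    (PySem.List.pyRange 0 (row_count - 2) 1).flatMap (fun r =>
      (PySem.List.pyRange 0 (column_count - 2) 1).map (fun c =>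
        ( ((PySem.List.pyRange 0 3 1).flatMap (fun i =>
              (PySem.List.pyRange 0 3 1).map (fun j =>
                PySem.List.pyGetD (PySem.List.pyGetD matrix_data (r + i) []) (c + j) 0))).sum,
          (PySem.List.pyRange 0 3 1).map (fun i =>
            (PySem.List.pyRange 0 3 1).map (fun j =>
              PySem.List.pyGetD (PySem.List.pyGetD matrix_data (r + i) []) (c + j) 0)) )))
  -- max(..., key=lambda x: x[0]); raises ValueError on an empty sequence, excluded by Pre_
  (PySem.List.max? candidates (fun x => x.1)).getD (0, [])

-- ===== PORT B =====
-- rp = [0]; acc = 0; for v in row[:column_count]: acc += v; rp.append(acc)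
def pvPrefixRow (column_count : Int) (row : List Int) : List Int :=
  ((PySem.List.slice row none (some column_count)).foldl
    (fun (q : Int × List Int) v => (q.1 + v, q.2 ++ [q.1 + v])) (0, [0])).2

def find_max_3x3_square_alt (matrix_data : List (List Int)) : Int × List (List Int) :=
  let row_count : Int := matrix_data.length
  let column_count : Int := (PySem.List.pyGetD matrix_data 0 []).length
  let zeros : List Int := List.replicate (column_count.toNat + 1) 0
  let pre : List (List Int) :=
    (matrix_data.foldl
      (fun (st : List Int × List (List Int)) row =>
        let cur := (st.1.zip (pvPrefixRow column_count row)).map (fun ab => ab.1 + ab.2)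
        (cur, st.2 ++ [cur]))
      (zeros, [zeros])).2
  let sel : Option Int × List (List Int) :=
    (PySem.List.pyRange 0 (row_count - 2) 1).foldl (fun st r =>
      (PySem.List.pyRange 0 (column_count - 2) 1).foldl
        (fun (st : Option Int × List (List Int)) c =>
          let s := PySem.List.pyGetD (PySem.List.pyGetD pre (r + 3) []) (c + 3) 0
                 - PySem.List.pyGetD (PySem.List.pyGetD pre r []) (c + 3) 0
                 - PySem.List.pyGetD (PySem.List.pyGetD pre (r + 3) []) c 0
                 + PySem.List.pyGetD (PySem.List.pyGetD pre r []) c 0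
          match st.1 with
          | none => (some s,
              (PySem.List.slice matrix_data (some r) (some (r + 3))).map
                (fun row => PySem.List.slice row (some c) (some (c + 3))))
          | some b =>
            if b < s then (some s,
              (PySem.List.slice matrix_data (some r) (some (r + 3))).map
                (fun row => PySem.List.slice row (some c) (some (c + 3))))
            else st)
        st)
      ((none : Option Int), ([] : List (List Int)))
  (sel.1.getD 0, sel.2)

-- ===== PRECONDITION & SPEC =====
-- Pre_ excludes exactly the inputs on which Python A raises: the empty matrix (IndexError on
-- matrix_data[0]), matrices with fewer than 3 rows or whose first row has fewer than 3 columns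
-- (ValueError: max() of an empty sequence), and matrices with some row shorter than the first
-- row (IndexError while summing a window).
def Pre_find_max_3x3_square (matrix_data : List (List Int)) : Prop :=
  3 ≤ matrix_data.length ∧
  3 ≤ (matrix_data.headD []).length ∧
  ∀ row ∈ matrix_data, (matrix_data.headD []).length ≤ row.length
instance (matrix_data : List (List Int)) : Decidable (Pre_find_max_3x3_square matrix_data) := by
  unfold Pre_find_max_3x3_square; infer_instance

def pvWitness_find_max_3x3_square : List (List Int) :=
  [[1, 2, 3], [4, 5, 6], [7, 8, 9]]

def Spec_find_max_3x3_square (matrix_data : List (List Int)) (out : Int × List (List Int)) : Prop := out = find_max_3x3_square_alt matrix_data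
instance (matrix_data : List (List Int)) (out : Int × List (List Int)) : Decidable (Spec_find_max_3x3_square matrix_data out) := by unfold Spec_find_max_3x3_square; infer_instance

-- ===== CLAIM (what is proved, stated in full; the proofs are below) =====
def Claim_equal_find_max_3x3_square : Prop := ∀ (matrix_data : List (List Int)), Dom_find_max_3x3_square matrix_data → Pre_find_max_3x3_square matrix_data → Spec_find_max_3x3_square matrix_data (find_max_3x3_square matrix_data)

-- ===== LEMMAS AND PROOFS =====

-- the 2D prefix sum the table is meant to hold
def pvP (m : List (List Int)) (i j : Nat) : Int :=
  ((m.take i).map (fun row => (row.take j).sum)).sum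

-- A's candidate at window (rn, cn): the nine-element sum and the 3x3 block
def pvCand (m : List (List Int)) (rn cn : Nat) : Int × List (List Int) :=
  ( (m.getD rn []).getD cn 0 + (m.getD rn []).getD (cn+1) 0 + (m.getD rn []).getD (cn+2) 0
    + (m.getD (rn+1) []).getD cn 0 + (m.getD (rn+1) []).getD (cn+1) 0 + (m.getD (rn+1) []).getD (cn+2) 0
    + (m.getD (rn+2) []).getD cn 0 + (m.getD (rn+2) []).getD (cn+1) 0 + (m.getD (rn+2) []).getD (cn+2) 0,
    [[(m.getD rn []).getD cn 0, (m.getD rn []).getD (cn+1) 0, (m.getD rn []).getD (cn+2) 0],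
     [(m.getD (rn+1) []).getD cn 0, (m.getD (rn+1) []).getD (cn+1) 0, (m.getD (rn+1) []).getD (cn+2) 0],
     [(m.getD (rn+2) []).getD cn 0, (m.getD (rn+2) []).getD (cn+1) 0, (m.getD (rn+2) []).getD (cn+2) 0]] )

-- the two selection steps, seen abstractly
def pvStepA (x : Int × List (List Int)) (acc : Option (Int × List (List Int))) :
    Option (Int × List (List Int)) :=
  match acc with
  | none => some x
  | some mm => if mm.1 < x.1 then some x else some mm

def pvStepB (x : Int × List (List Int)) (st : Option Int × List (List Int)) :
    Option Int × List (List Int) :=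
  match st.1 with
  | none => (some x.1, x.2)
  | some b => if b < x.1 then (some x.1, x.2) else st

def pvRel (st : Option Int × List (List Int)) (acc : Option (Int × List (List Int))) : Prop :=
  (acc = none → st.1 = none) ∧ ∀ p, acc = some p → st = (some p.1, p.2)

theorem pv_prefix_fold (l : List Int) : ∀ (s : Int) (acc : List Int),
    (l.foldl (fun (q : Int × List Int) v => (q.1 + v, q.2 ++ [q.1 + v])) (s, acc)).2
    = acc ++ (List.range l.length).map (fun k => s + (l.take (k+1)).sum) := by
  induction l with
  | nil => intro s acc; simp
  | cons v t ih =>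
      intro s acc
      simp only [List.foldl_cons, List.length_cons, List.range_succ_eq_map, List.map_cons,
        List.map_map]
      rw [ih (s + v) (acc ++ [s + v])]
      simp [Function.comp, add_assoc]

theorem pv_prefixRow_spec (C : Nat) (row : List Int) (h : C ≤ row.length) :
    pvPrefixRow (C : Int) row = (List.range (C+1)).map (fun j => (row.take j).sum) := by
  unfold pvPrefixRow
  rw [PySem.List.slice_to_natCast, pv_prefix_fold]
  have hlen : (row.take C).length = C := by simp [h]
  rw [hlen]
  rw [List.range_succ_eq_map, List.map_cons, List.map_map]
  simp only [List.take_zero, List.sum_nil]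
  rw [List.singleton_append]
  congr 1
  apply List.map_congr_left
  intro k hk
  simp at hk
  simp [Function.comp, List.take_take, Nat.min_eq_left (by omega : k + 1 ≤ C)]

theorem pv_table_fold (C : Nat) : ∀ (ms : List (List Int)), (∀ row ∈ ms, C ≤ row.length) →
    ∀ (g : Nat → Int) (tab : List (List Int)),
    (ms.foldl
      (fun (st : List Int × List (List Int)) row =>
        ((st.1.zip (pvPrefixRow (C : Int) row)).map (fun ab => ab.1 + ab.2),
         st.2 ++ [(st.1.zip (pvPrefixRow (C : Int) row)).map (fun ab => ab.1 + ab.2)]))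
      ((List.range (C+1)).map g, tab)).2
    = tab ++ (List.range ms.length).map (fun i => (List.range (C+1)).map
        (fun j => g j + ((ms.take (i+1)).map (fun row => (row.take j).sum)).sum)) := by
  intro ms
  induction ms with
  | nil => intro _ g tab; simp
  | cons row t ih =>
      intro hms g tab
      have hrow : C ≤ row.length := hms row (List.mem_cons_self ..)
      simp only [List.foldl_cons]
      have hcur : ((List.range (C+1)).map g |>.zip (pvPrefixRow (C : Int) row)).map
          (fun ab => ab.1 + ab.2)
          = (List.range (C+1)).map (fun j => g j + (row.take j).sum) := by
        rw [pv_prefixRow_spec C row hrow, List.zip_map', List.map_map]; rfl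
      simp only [hcur]
      rw [ih (fun r hr => hms r (List.mem_cons_of_mem _ hr))
        (fun j => g j + (row.take j).sum) (tab ++ [(List.range (C+1)).map (fun j => g j + (row.take j).sum)])]
      simp only [List.length_cons, List.range_succ_eq_map, List.map_cons, List.map_map,
        List.append_assoc, List.singleton_append]
      congr 2
      · simp
      · apply List.map_congr_left
        intro k hk
        simp [Function.comp, add_assoc]

theorem pv_pre_spec (m : List (List Int)) (C : Nat)
    (hrows : ∀ row ∈ m, C ≤ row.length) :
    (m.foldl
      (fun (st : List Int × List (List Int)) row =>
        ((st.1.zip (pvPrefixRow (C : Int) row)).map (fun ab => ab.1 + ab.2),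
         st.2 ++ [(st.1.zip (pvPrefixRow (C : Int) row)).map (fun ab => ab.1 + ab.2)]))
      (List.replicate (C + 1) 0, [List.replicate (C + 1) 0])).2
    = (List.range (m.length + 1)).map (fun i => (List.range (C+1)).map (fun j => pvP m i j)) := by
  have hrep : List.replicate (C + 1) (0 : Int) = (List.range (C+1)).map (fun _ => 0) := by
    simp [List.map_const']
  rw [hrep, pv_table_fold C m hrows (fun _ => 0)]
  conv_rhs => rw [List.range_succ_eq_map (n := m.length)]
  rw [List.map_cons]
  simp [pvP, List.map_map, Function.comp]

theorem pv_take3 {α : Type} (l : List α) (n : Nat) (d : α) (h : n + 3 ≤ l.length) :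
    (l.drop n).take 3 = [l.getD n d, l.getD (n+1) d, l.getD (n+2) d] := by
  rw [List.drop_eq_getElem_cons (show n < l.length by omega),
    List.drop_eq_getElem_cons (show n + 1 < l.length by omega),
    List.drop_eq_getElem_cons (show n + 1 + 1 < l.length by omega),
    List.getD_eq_getElem _ _ (show n < l.length by omega),
    List.getD_eq_getElem _ _ (show n + 1 < l.length by omega),
    List.getD_eq_getElem _ _ (show n + 2 < l.length by omega)]
  rfl

theorem pv_row_window (row : List Int) (cn : Nat) (h : cn + 3 ≤ row.length) :
    (row.take (cn+3)).sum
    = (row.take cn).sum + (row.getD cn 0 + row.getD (cn+1) 0 + row.getD (cn+2) 0) := by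
  rw [List.take_add, List.sum_append, pv_take3 row cn 0 h]
  simp [add_assoc]

theorem pv_col_window (m : List (List Int)) (j : Nat) (rn : Nat) (h : rn + 3 ≤ m.length) :
    pvP m (rn+3) j
    = pvP m rn j + (((m.getD rn []).take j).sum + ((m.getD (rn+1) []).take j).sum
        + ((m.getD (rn+2) []).take j).sum) := by
  unfold pvP
  rw [List.take_add, List.map_append, List.sum_append, pv_take3 m rn [] h]
  simp [add_assoc]

theorem pv_window_sum (m : List (List Int)) (C : Nat) (hrows : ∀ row ∈ m, C ≤ row.length)
    (rn cn : Nat) (hr : rn + 3 ≤ m.length) (hc : cn + 3 ≤ C) :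
    pvP m (rn+3) (cn+3) - pvP m rn (cn+3) - pvP m (rn+3) cn + pvP m rn cn
    = (pvCand m rn cn).1 := by
  have hlen : ∀ i, i < m.length → cn + 3 ≤ (m.getD i []).length := by
    intro i hi
    rw [List.getD_eq_getElem _ _ hi]
    exact le_trans hc (hrows _ (List.getElem_mem hi))
  have h0 := pv_row_window (m.getD rn []) cn (hlen rn (by omega))
  have h1 := pv_row_window (m.getD (rn+1) []) cn (hlen (rn+1) (by omega))
  have h2 := pv_row_window (m.getD (rn+2) []) cn (hlen (rn+2) (by omega))
  rw [pv_col_window m (cn+3) rn hr, pv_col_window m cn rn hr, h0, h1, h2]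
  simp only [pvCand]
  ring

theorem pv_slice3 {α : Type} (l : List α) (n : Nat) (d : α) (h : n + 3 ≤ l.length) :
    PySem.List.slice l (some (n : Int)) (some ((n + 3 : Nat) : Int))
    = [l.getD n d, l.getD (n+1) d, l.getD (n+2) d] := by
  rw [PySem.List.slice_natCast, show n + 3 - n = 3 by omega, pv_take3 l n d h]

theorem pv_sub_spec (m : List (List Int)) (C : Nat) (hrows : ∀ row ∈ m, C ≤ row.length)
    (rn cn : Nat) (hr : rn + 3 ≤ m.length) (hc : cn + 3 ≤ C) :
    (PySem.List.slice m (some (rn : Int)) (some ((rn + 3 : Nat) : Int))).map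
      (fun row => PySem.List.slice row (some (cn : Int)) (some ((cn + 3 : Nat) : Int)))
    = (pvCand m rn cn).2 := by
  have hlen : ∀ i, i < m.length → cn + 3 ≤ (m.getD i []).length := by
    intro i hi
    rw [List.getD_eq_getElem _ _ hi]
    exact le_trans hc (hrows _ (List.getElem_mem hi))
  rw [pv_slice3 m rn [] hr]
  simp only [List.map_cons, List.map_nil, pvCand]
  rw [pv_slice3 _ cn 0 (hlen rn (by omega)), pv_slice3 _ cn 0 (hlen (rn+1) (by omega)),
    pv_slice3 _ cn 0 (hlen (rn+2) (by omega))]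

theorem pv_rel_step (x : Int × List (List Int)) (st : Option Int × List (List Int))
    (acc : Option (Int × List (List Int))) (h : pvRel st acc) :
    pvRel (pvStepB x st) (pvStepA x acc) := by
  obtain ⟨h1, h2⟩ := h
  cases acc with
  | none =>
      have : st.1 = none := h1 rfl
      constructor
      · intro hn; simp [pvStepA] at hn
      · intro p hp
        simp [pvStepA] at hp
        simp [pvStepB, this, ← hp]
  | some mm =>
      have hst : st = (some mm.1, mm.2) := h2 mm rfl
      constructor
      · intro hn; simp [pvStepA] at hn; split at hn <;> simp_all
      · intro p hp
        simp only [pvStepA] at hp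
        simp only [pvStepB, hst]
        by_cases hlt : mm.1 < x.1
        · simp [hlt] at hp ⊢; simp [← hp]
        · simp [hlt] at hp ⊢; simp [← hp]

theorem pv_sim1 (f : Int → Int × List (List Int)) (LC : List Int) :
    ∀ (st : Option Int × List (List Int)) (acc : Option (Int × List (List Int))),
    pvRel st acc →
    pvRel (LC.foldl (fun st c => pvStepB (f c) st) st)
          (LC.foldl (fun acc c => pvStepA (f c) acc) acc) := by
  induction LC with
  | nil => intro st acc h; simpa using h
  | cons c t ih =>
      intro st acc h
      simpa using ih _ _ (pv_rel_step (f c) st acc h)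

theorem pv_sim2 (f : Int → Int → Int × List (List Int)) (LR LC : List Int) :
    ∀ (st : Option Int × List (List Int)) (acc : Option (Int × List (List Int))),
    pvRel st acc →
    pvRel (LR.foldl (fun st r => LC.foldl (fun st c => pvStepB (f r c) st) st) st)
          (LR.foldl (fun acc r => LC.foldl (fun acc c => pvStepA (f r c) acc) acc) acc) := by
  induction LR with
  | nil => intro st acc h; simpa using h
  | cons r t ih =>
      intro st acc h
      simpa using ih _ _ (pv_sim1 (f r) LC st acc h)

theorem pv_stepA_isSome (x : Int × List (List Int)) (acc : Option (Int × List (List Int))) :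
    (pvStepA x acc).isSome := by
  cases acc
  · simp [pvStepA]
  · simp [pvStepA]; split <;> simp

theorem pv_foldl_stepA_isSome {α : Type} (g : α → Int × List (List Int)) :
    ∀ (L : List α) (acc : Option (Int × List (List Int))), acc.isSome →
    (L.foldl (fun acc x => pvStepA (g x) acc) acc).isSome := by
  intro L
  induction L with
  | nil => intro acc h; simpa using h
  | cons x tl ih =>
      intro acc _
      simpa using ih (pvStepA (g x) acc) (pv_stepA_isSome (g x) acc)

theorem pv_outer_isSome (f : Int → Int → Int × List (List Int)) (LC : List Int) :
    ∀ (LR : List Int) (acc : Option (Int × List (List Int))), acc.isSome →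
    (LR.foldl (fun acc r => LC.foldl (fun acc c => pvStepA (f r c) acc) acc) acc).isSome := by
  intro LR
  induction LR with
  | nil => intro acc h; simpa using h
  | cons r tl ih =>
      intro acc h
      rw [List.foldl_cons]
      exact ih _ (pv_foldl_stepA_isSome (fun c => f r c) LC acc h)

theorem pv_nested_isSome (f : Int → Int → Int × List (List Int)) (LR LC : List Int)
    (hLR : LR ≠ []) (hLC : LC ≠ []) :
    (LR.foldl (fun acc r => LC.foldl (fun acc c => pvStepA (f r c) acc) acc) none).isSome := by
  obtain ⟨r0, LR', rfl⟩ := List.exists_cons_of_ne_nil hLR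
  obtain ⟨c0, LC', rfl⟩ := List.exists_cons_of_ne_nil hLC
  rw [List.foldl_cons]
  apply pv_outer_isSome
  rw [List.foldl_cons]
  exact pv_foldl_stepA_isSome _ LC' _ (pv_stepA_isSome _ _)

theorem pv_candA_eq (m : List (List Int)) (rn cn : Nat) :
    ( ((PySem.List.pyRange 0 3 1).flatMap (fun i =>
          (PySem.List.pyRange 0 3 1).map (fun j =>
            PySem.List.pyGetD (PySem.List.pyGetD m ((rn : Int) + i) []) ((cn : Int) + j) 0))).sum,
      (PySem.List.pyRange 0 3 1).map (fun i =>
        (PySem.List.pyRange 0 3 1).map (fun j =>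
          PySem.List.pyGetD (PySem.List.pyGetD m ((rn : Int) + i) []) ((cn : Int) + j) 0)) )
    = pvCand m rn cn := by
  rw [show PySem.List.pyRange 0 3 1 = [0, 1, 2] from by decide]
  have er1 : ((rn : Int) + 1) = ((rn + 1 : Nat) : Int) := by push_cast; ring
  have er2 : ((rn : Int) + 2) = ((rn + 2 : Nat) : Int) := by push_cast; ring
  have ec1 : ((cn : Int) + 1) = ((cn + 1 : Nat) : Int) := by push_cast; ring
  have ec2 : ((cn : Int) + 2) = ((cn + 2 : Nat) : Int) := by push_cast; ring
  simp only [List.flatMap_cons, List.flatMap_nil, List.map_cons, List.map_nil, List.append_nil,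
    List.sum_append, List.sum_cons, List.sum_nil, add_zero, er1, er2, ec1, ec2,
    PySem.List.pyGetD_natCast]
  unfold pvCand
  rw [Prod.mk.injEq]
  exact ⟨by ring, rfl⟩

theorem pv_A_shape (h0 : List Int) (t : List (List Int))
    (hR3 : 3 ≤ (h0 :: t).length) (hC3 : 3 ≤ h0.length) :
    find_max_3x3_square (h0 :: t)
    = ((PySem.List.pyRange 0 (((h0 :: t).length - 2 : Nat) : Int) 1).foldl
        (fun acc r => (PySem.List.pyRange 0 ((h0.length - 2 : Nat) : Int) 1).foldl
          (fun acc c => pvStepA (pvCand (h0 :: t) r.toNat c.toNat) acc) acc) none).getD (0, []) := by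
  simp only [find_max_3x3_square]
  rw [show PySem.List.pyGetD (h0 :: t) 0 [] = h0 from by simp [pysem]]
  rw [show (((h0 :: t).length : Nat) : Int) - 2 = (((h0 :: t).length - 2 : Nat) : Int) by omega]
  rw [show ((h0.length : Nat) : Int) - 2 = ((h0.length - 2 : Nat) : Int) by omega]
  simp only [PySem.List.max?]
  rw [List.foldl_flatMap]
  simp only [List.foldl_map]
  apply congrArg (fun o : Option (Int × List (List Int)) => o.getD (0, []))
  apply PySem.List.foldl_congr_mem'
  intro r hr
  obtain ⟨hr0, _⟩ := (PySem.List.mem_pyRange_one).1 hr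
  obtain ⟨rn, rfl⟩ : ∃ rn : Nat, r = (rn : Int) := ⟨r.toNat, (Int.toNat_of_nonneg hr0).symm⟩
  intro acc
  apply PySem.List.foldl_congr_mem'
  intro c hc
  obtain ⟨hc0, _⟩ := (PySem.List.mem_pyRange_one).1 hc
  obtain ⟨cn, rfl⟩ : ∃ cn : Nat, c = (cn : Int) := ⟨c.toNat, (Int.toNat_of_nonneg hc0).symm⟩
  intro acc
  rw [show ((rn : Int)).toNat = rn from Int.toNat_natCast rn,
    show ((cn : Int)).toNat = cn from Int.toNat_natCast cn]
  have hcand := pv_candA_eq (h0 :: t) rn cn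
  cases acc with
  | none =>
      show _ = pvStepA (pvCand (h0 :: t) rn cn) none
      simp only [pvStepA]
      exact congrArg some hcand
  | some mm =>
      show _ = pvStepA (pvCand (h0 :: t) rn cn) (some mm)
      simp only [pvStepA]
      rw [← hcand]

theorem pv_B_shape (h0 : List Int) (t : List (List Int))
    (hR3 : 3 ≤ (h0 :: t).length) (hC3 : 3 ≤ h0.length)
    (hrows : ∀ row ∈ h0 :: t, h0.length ≤ row.length) :
    find_max_3x3_square_alt (h0 :: t)
    = (((PySem.List.pyRange 0 (((h0 :: t).length - 2 : Nat) : Int) 1).foldl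
        (fun st r => (PySem.List.pyRange 0 ((h0.length - 2 : Nat) : Int) 1).foldl
          (fun st c => pvStepB (pvCand (h0 :: t) r.toNat c.toNat) st) st)
        ((none : Option Int), ([] : List (List Int)))).1.getD 0,
       ((PySem.List.pyRange 0 (((h0 :: t).length - 2 : Nat) : Int) 1).foldl
        (fun st r => (PySem.List.pyRange 0 ((h0.length - 2 : Nat) : Int) 1).foldl
          (fun st c => pvStepB (pvCand (h0 :: t) r.toNat c.toNat) st) st)
        ((none : Option Int), ([] : List (List Int)))).2) := by
  simp only [find_max_3x3_square_alt]
  rw [show PySem.List.pyGetD (h0 :: t) 0 [] = h0 from by simp [pysem]]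
  rw [show (((h0 :: t).length : Nat) : Int) - 2 = (((h0 :: t).length - 2 : Nat) : Int) by omega]
  rw [show ((h0.length : Nat) : Int) - 2 = ((h0.length - 2 : Nat) : Int) by omega]
  rw [show ((h0.length : Int)).toNat = h0.length from Int.toNat_natCast _]
  rw [pv_pre_spec (h0 :: t) h0.length hrows]
  set P := (List.range ((h0 :: t).length + 1)).map
      (fun i => (List.range (h0.length + 1)).map (fun j => pvP (h0 :: t) i j)) with hPdef
  have hL : ∀ (i j : Nat), i < (h0 :: t).length + 1 → j < h0.length + 1 →
      PySem.List.pyGetD (PySem.List.pyGetD P (i : Int) []) (j : Int) 0 = pvP (h0 :: t) i j := by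
    intro i j hi hj
    rw [hPdef]
    simp only [PySem.List.pyGetD_natCast]
    rw [PySem.List.getD_map_range _ _ _ _ hi, PySem.List.getD_map_range _ _ _ _ hj]
  apply congrArg (fun st : Option Int × List (List Int) => (st.1.getD 0, st.2))
  apply PySem.List.foldl_congr_mem'
  intro r hr
  obtain ⟨hr0, hrlt⟩ := (PySem.List.mem_pyRange_one).1 hr
  obtain ⟨rn, rfl⟩ : ∃ rn : Nat, r = (rn : Int) := ⟨r.toNat, (Int.toNat_of_nonneg hr0).symm⟩
  intro st
  apply PySem.List.foldl_congr_mem'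
  intro c hc
  obtain ⟨hc0, hclt⟩ := (PySem.List.mem_pyRange_one).1 hc
  obtain ⟨cn, rfl⟩ : ∃ cn : Nat, c = (cn : Int) := ⟨c.toNat, (Int.toNat_of_nonneg hc0).symm⟩
  intro st
  rw [show ((rn : Int)).toNat = rn from Int.toNat_natCast rn,
    show ((cn : Int)).toNat = cn from Int.toNat_natCast cn]
  have hrn : rn + 3 ≤ (h0 :: t).length := by
    have h := hrlt; push_cast at h; omega
  have hcn : cn + 3 ≤ h0.length := by
    have h := hclt; push_cast at h; omega
  rw [show ((rn : Int) + 3) = ((rn + 3 : Nat) : Int) by push_cast; ring,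
    show ((cn : Int) + 3) = ((cn + 3 : Nat) : Int) by push_cast; ring]
  rw [hL (rn+3) (cn+3) (by omega) (by omega), hL rn (cn+3) (by omega) (by omega),
    hL (rn+3) cn (by omega) (by omega), hL rn cn (by omega) (by omega)]
  rw [pv_window_sum (h0 :: t) h0.length hrows rn cn hrn hcn]
  rw [pv_sub_spec (h0 :: t) h0.length hrows rn cn hrn hcn]
  obtain ⟨o, sub⟩ := st
  cases o with
  | none => simp [pvStepB]
  | some b =>
      show _ = pvStepB (pvCand (h0 :: t) rn cn) (some b, sub)
      simp only [pvStepB]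

-- ===== VERDICT (by name: the statement is the Claim_ definition above) =====
theorem find_max_3x3_square_spec : Claim_equal_find_max_3x3_square := by
  intro m _dom hpre
  obtain ⟨hR3, hC3, hrows⟩ := hpre
  unfold Spec_find_max_3x3_square
  obtain ⟨h0, t, rfl⟩ : ∃ h0 t, m = h0 :: t := by
    cases m with
    | nil => simp at hR3
    | cons a b => exact ⟨a, b, rfl⟩
  have hC3' : 3 ≤ h0.length := by simpa using hC3
  have hrows' : ∀ row ∈ h0 :: t, h0.length ≤ row.length := by simpa using hrows
  rw [pv_A_shape h0 t hR3 hC3', pv_B_shape h0 t hR3 hC3' hrows']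
  have hrel := pv_sim2 (fun r c => pvCand (h0 :: t) r.toNat c.toNat)
    (PySem.List.pyRange 0 (((h0 :: t).length - 2 : Nat) : Int) 1)
    (PySem.List.pyRange 0 ((h0.length - 2 : Nat) : Int) 1)
    ((none : Option Int), ([] : List (List Int))) none ⟨fun _ => rfl, by simp⟩
  have hLR : PySem.List.pyRange 0 (((h0 :: t).length - 2 : Nat) : Int) 1 ≠ [] := by
    rw [PySem.List.pyRange_one_cons
      (by exact_mod_cast (show 0 < (h0 :: t).length - 2 by omega))]
    simp
  have hLC : PySem.List.pyRange 0 ((h0.length - 2 : Nat) : Int) 1 ≠ [] := by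
    rw [PySem.List.pyRange_one_cons
      (by exact_mod_cast (show 0 < h0.length - 2 by omega))]
    simp
  have hsome := pv_nested_isSome (fun r c => pvCand (h0 :: t) r.toNat c.toNat) _ _ hLR hLC
  obtain ⟨p, hp⟩ := Option.isSome_iff_exists.1 hsome
  have hst := hrel.2 p hp
  rw [hp, hst]
  simp
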